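-- pv_equiv track=rewrite | github.com/the-yaml-life/gai | src/gai/core/tokens.py | chunk_by_files
-- ===== SOURCE A (Python) =====
-- from typing import List
--
-- def estimate_tokens(text: str) -> int:
--     """
--     Estimate number of tokens in text.
--
--     Rule of thumb for code/diffs:
--     - ~3.5 chars = 1 token
--     - More conservative: ~3 chars = 1 token
--     """
--     if not text:
--         return 0
--
--     # Conservative estimation
--     chars = len(text)
--     return chars // 3
--
-- def chunk_by_files(diff: str, max_tokens: int) -> List[str]:
--     """
--     Chunk diff by files, keeping file diffs together when possible.
--
--     Args:
--         diff: Git diff output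
--         max_tokens: Maximum tokens per chunk
--
--     Returns:
--         List of diff chunks
--     """
--     if estimate_tokens(diff) <= max_tokens:
--         return [diff]
--
--     # Split by file
--     file_diffs = []
--     current_file = []
--
--     for line in diff.split('\n'):
--         if line.startswith('diff --git'):
--             if current_file:
--                 file_diffs.append('\n'.join(current_file))
--             current_file = [line]
--         else:
--             current_file.append(line)
--
--     if current_file:
--         file_diffs.append('\n'.join(current_file))
--
--     # Group files into chunks
--     chunks = []
--     current_chunk = []
--     current_size = 0
--
--     for file_diff in file_diffs:
--         file_size = estimate_tokens(file_diff)
--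
--         if current_size + file_size > max_tokens and current_chunk:
--             chunks.append('\n'.join(current_chunk))
--             current_chunk = []
--             current_size = 0
--
--         current_chunk.append(file_diff)
--         current_size += file_size
--
--     if current_chunk:
--         chunks.append('\n'.join(current_chunk))
--
--     return chunks
-- ===== SOURCE B (Python) =====
-- def estimate_tokens(text: str) -> int:
--     if not text:
--         return 0
--     return len(text) // 3
--
-- def chunk_by_files(diff: str, max_tokens: int):
--     if estimate_tokens(diff) <= max_tokens:
--         return [diff]
--
--     # Single fused pass: close a file block at each 'diff --git' boundary and
--     # greedily pack it into the current chunk right there.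
--     chunks = []
--     current_chunk = []
--     current_size = 0
--     cur_file = []
--     for line in diff.split('\n'):
--         if line.startswith('diff --git') and cur_file:
--             block = '\n'.join(cur_file)
--             size = estimate_tokens(block)
--             if current_size + size > max_tokens and current_chunk:
--                 chunks.append('\n'.join(current_chunk))
--                 current_chunk = []
--                 current_size = 0
--             current_chunk.append(block)
--             current_size += size
--             cur_file = [line]
--         else:
--             cur_file.append(line)
--
--     # split('\n') always yields at least one line, so cur_file is non-empty.
--     block = '\n'.join(cur_file)
--     size = estimate_tokens(block)
--     if current_size + size > max_tokens and current_chunk: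
--         chunks.append('\n'.join(current_chunk))
--         current_chunk = []
--     current_chunk.append(block)
--     chunks.append('\n'.join(current_chunk))
--     return chunks
-- ===== Notes on version B (the rewrite author's own statement) =====
-- stated objective: alternative
-- what changed: A's two sequential passes (split the diff into per-file blocks, then greedily group the blocks into token-bounded chunks) are fused into one loop over the lines that packs each file block into the chunks the moment its boundary is seen.
import Mathlib
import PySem

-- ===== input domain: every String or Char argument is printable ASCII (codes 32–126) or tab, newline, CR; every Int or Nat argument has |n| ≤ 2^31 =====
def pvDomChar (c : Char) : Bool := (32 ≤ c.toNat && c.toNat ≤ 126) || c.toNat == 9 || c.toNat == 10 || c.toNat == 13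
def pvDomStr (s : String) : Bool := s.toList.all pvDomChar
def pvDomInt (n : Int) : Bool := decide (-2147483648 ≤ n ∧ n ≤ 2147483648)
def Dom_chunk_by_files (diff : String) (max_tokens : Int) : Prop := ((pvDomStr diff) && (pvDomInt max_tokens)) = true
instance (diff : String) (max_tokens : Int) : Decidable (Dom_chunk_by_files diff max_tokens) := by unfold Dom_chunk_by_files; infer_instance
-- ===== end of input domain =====

-- B fuses A's two passes (split into file blocks, then greedy grouping) into one
-- loop over the lines that packs each file block the moment it is closed; same
-- return value, objective: alternative single-pass decomposition (no speed claim).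

-- estimate_tokens, used by both versions (module helper in the Python source)
def pvEst (text : String) : Int :=
  if text = "" then 0 else PySem.Int.floordiv (PySem.Str.len text) 3

-- ===== PORT A =====
-- phase-1 step of A: split the diff into per-file blocks
def pvStep1 (st : List String × List String) (line : String) : List String × List String :=
  if PySem.Str.startswith line "diff --git" then
    (if st.2 ≠ [] then st.1 ++ [PySem.Str.join "\n" st.2] else st.1, [line])
  else (st.1, st.2 ++ [line])

-- phase-2 step of A: greedy grouping of file blocks into chunks
def pvAddF (mt : Int) (st : List String × List String × Int) (fd : String) :
    List String × List String × Int :=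
  let fs := pvEst fd
  let st' := if st.2.2 + fs > mt ∧ st.2.1 ≠ [] then
      (st.1 ++ [PySem.Str.join "\n" st.2.1], ([] : List String), (0 : Int))
    else st
  (st'.1, st'.2.1 ++ [fd], st'.2.2 + fs)

def chunk_by_files (diff : String) (max_tokens : Int) : List String :=
  if pvEst diff ≤ max_tokens then [diff]
  else
    let lines := (PySem.Str.split? diff "\n").getD []   -- sep "\n" ≠ "": getD never hit
    let p1 := lines.foldl pvStep1 ([], [])
    let file_diffs := if p1.2 ≠ [] then p1.1 ++ [PySem.Str.join "\n" p1.2] else p1.1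
    let p2 := file_diffs.foldl (pvAddF max_tokens) ([], [], 0)
    if p2.2.1 ≠ [] then p2.1 ++ [PySem.Str.join "\n" p2.2.1] else p2.1

-- ===== PORT B =====
-- the packing rule B applies at each file boundary and once at the end
def pvPack (mt : Int) (st : List String × List String × Int) (block : String) :
    List String × List String × Int :=
  let size := pvEst block
  if st.2.2 + size > mt ∧ st.2.1 ≠ [] then
    (st.1 ++ [PySem.Str.join "\n" st.2.1], [block], size)
  else (st.1, st.2.1 ++ [block], st.2.2 + size)

-- B's single fused loop step; state = (cur_file, (chunks, current_chunk, current_size))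
def pvStepB (mt : Int) (st : List String × List String × List String × Int)
    (line : String) : List String × List String × List String × Int :=
  if PySem.Str.startswith line "diff --git" ∧ st.1 ≠ [] then
    ([line], pvPack mt st.2 (PySem.Str.join "\n" st.1))
  else (st.1 ++ [line], st.2)

def chunk_by_files_alt (diff : String) (max_tokens : Int) : List String :=
  if pvEst diff ≤ max_tokens then [diff]
  else
    let st := ((PySem.Str.split? diff "\n").getD []).foldl (pvStepB max_tokens)
      ([], [], [], 0)
    let g := pvPack max_tokens st.2 (PySem.Str.join "\n" st.1)
    g.1 ++ [PySem.Str.join "\n" g.2.1]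

-- ===== PRECONDITION & SPEC =====
def Spec_chunk_by_files (diff : String) (max_tokens : Int) (out : List String) : Prop := out = chunk_by_files_alt diff max_tokens
instance (diff : String) (max_tokens : Int) (out : List String) : Decidable (Spec_chunk_by_files diff max_tokens out) := by unfold Spec_chunk_by_files; infer_instance

-- ===== CLAIM (what is proved, stated in full; the proofs are below) =====
def Claim_equal_chunk_by_files : Prop := ∀ (diff : String) (max_tokens : Int), Dom_chunk_by_files diff max_tokens → Spec_chunk_by_files diff max_tokens (chunk_by_files diff max_tokens)

-- ===== LEMMAS AND PROOFS =====

-- str.split on a non-empty separator always yields a non-empty list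
theorem pv_go_ne_nil (sep : List Char) (fuel : Nat) (l cur : List Char)
    (acc : List (List Char)) : PySem.Chars.splitOn.go sep fuel l cur acc ≠ [] := by
  induction fuel generalizing l cur acc with
  | zero => simp [PySem.Chars.splitOn.go]
  | succ n ih =>
    cases l with
    | nil => simp [PySem.Chars.splitOn.go]
    | cons c rest =>
      rw [PySem.Chars.splitOn.go]
      split
      · exact ih _ _ _
      · exact ih _ _ _

theorem pv_lines_ne_nil (diff : String) :
    (PySem.Str.split? diff "\n").getD [] ≠ [] := by
  simp only [PySem.Str.split?, PySem.Chars.split?, PySem.Chars.splitOn]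
  have h : ("\n".toList.isEmpty) = false := by decide
  rw [h]
  simp only [Bool.false_eq_true, if_false, Option.map_some, Option.getD_some, ne_eq,
    List.map_eq_nil_iff]
  exact pv_go_ne_nil _ _ _ _ _

-- phase-1 fold: the already-emitted blocks are a pure prefix accumulator
theorem pv_step1_acc (lines : List String) (fds0 cur0 : List String) :
    lines.foldl pvStep1 (fds0, cur0)
      = (fds0 ++ (lines.foldl pvStep1 ([], cur0)).1, (lines.foldl pvStep1 ([], cur0)).2) := by
  induction lines generalizing fds0 cur0 with
  | nil => simp
  | cons l ls ih =>
    simp only [List.foldl_cons, pvStep1]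
    by_cases hs : PySem.Str.startswith l "diff --git" = true <;>
      by_cases hc : cur0 = []
    · simp only [hs, hc, ne_eq, not_true_eq_false, if_true, if_false]
      exact ih fds0 [l]
    · simp only [hs, hc, ne_eq, not_false_eq_true, if_true, List.nil_append]
      rw [ih (fds0 ++ [PySem.Str.join "\n" cur0]) [l], ih [PySem.Str.join "\n" cur0] [l]]
      simp [List.append_assoc]
    · simp only [hs, List.nil_append]
      exact ih fds0 (cur0 ++ [l])
    · simp only [hs, List.nil_append]
      exact ih fds0 (cur0 ++ [l])

-- the open file buffer stays non-empty once a line has been consumed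
theorem pv_cur_ne_nil (lines : List String) (st : List String × List String)
    (h : st.2 ≠ [] ∨ lines ≠ []) : (lines.foldl pvStep1 st).2 ≠ [] := by
  induction lines generalizing st with
  | nil => simpa using h.resolve_right (by simp)
  | cons l ls ih =>
    simp only [List.foldl_cons]
    apply ih _ (Or.inl ?_)
    unfold pvStep1
    split <;> simp

theorem pv_pack_eq (mt : Int) (st : List String × List String × Int) (fd : String) :
    pvPack mt st fd = pvAddF mt st fd := by
  simp only [pvPack, pvAddF]
  split <;> simp

-- the fused loop of B computes phase 1's open buffer together with phase 2 run
-- over the blocks phase 1 has emitted so far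
theorem pv_fused (mt : Int) (lines : List String) (cur0 : List String)
    (s : List String × List String × Int) :
    lines.foldl (pvStepB mt) (cur0, s)
      = ((lines.foldl pvStep1 ([], cur0)).2,
         (lines.foldl pvStep1 ([], cur0)).1.foldl (pvAddF mt) s) := by
  induction lines generalizing cur0 s with
  | nil => simp
  | cons l ls ih =>
    simp only [List.foldl_cons, pvStepB, pvStep1]
    by_cases hs : PySem.Str.startswith l "diff --git" = true <;>
      by_cases hc : cur0 = []
    · -- boundary, empty buffer: no emit
      simp only [hs, hc, ne_eq, not_true_eq_false, and_false, if_false, if_true,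
        List.nil_append]
      exact ih [l] s
    · -- boundary, non-empty buffer: emit the block and pack it
      simp only [hs, hc, ne_eq, not_false_eq_true, and_self, if_true, List.nil_append]
      rw [ih [l] (pvPack mt s (PySem.Str.join "\n" cur0)), pv_pack_eq,
        pv_step1_acc ls [PySem.Str.join "\n" cur0] [l]]
      simp
    · simp only [hs, List.nil_append]
      exact ih (cur0 ++ [l]) s
    · simp only [hs, List.nil_append]
      exact ih (cur0 ++ [l]) s

-- ===== VERDICT (by name: the statement is the Claim_ definition above) =====
theorem chunk_by_files_spec : Claim_equal_chunk_by_files := by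
  intro diff max_tokens _
  unfold Spec_chunk_by_files chunk_by_files chunk_by_files_alt
  by_cases h : pvEst diff ≤ max_tokens
  · simp only [h, if_true]
  · simp only [h, if_false]
    have hcur : (((PySem.Str.split? diff "\n").getD []).foldl pvStep1 ([], [])).2 ≠ [] :=
      pv_cur_ne_nil _ _ (Or.inr (pv_lines_ne_nil diff))
    rw [pv_fused]
    simp only [hcur, ne_eq, not_false_eq_true, if_true]
    rw [List.foldl_append, List.foldl_cons, List.foldl_nil, pv_pack_eq]
    have hcc : ∀ (st : List String × List String × Int) (fd : String),
        (pvAddF max_tokens st fd).2.1 ≠ [] := by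
      intro st fd
      simp only [pvAddF]
      split <;> simp
    simp only [hcc, not_false_eq_true, if_true]
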